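-- pv_equiv track=rewrite | github.com/ShengNW/sample_mRNA_5090_Graph | src/gen/build_rbp_trna_dataset.py | _flatten_segments
-- ===== SOURCE A (Python) =====
-- from typing import Dict, Iterable, List, Mapping, Optional, Sequence, Tuple
--
-- def _flatten_segments(segments: Sequence[Tuple[int, int]], strand: str) -> List[int]:
--     """Return a list of genomic positions following transcript orientation."""
--
--     if not segments:
--         return []
--     ordered = sorted(segments, key=lambda x: x[0])
--     positions: List[int] = []
--     if strand == "-":
--         ordered = list(reversed(ordered))
--         for start, end in ordered:
--             for pos in range(end, start - 1, -1):
--                 positions.append(pos)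
--     else:
--         for start, end in ordered:
--             for pos in range(start, end + 1):
--                 positions.append(pos)
--     return positions
-- ===== SOURCE B (Python) =====
-- def _flatten_segments(segments, strand):
--     """Selection-based: repeatedly pop the first segment with minimal start,
--     emit its range; reverse the whole result for the '-' strand."""
--     segs = list(segments)
--     positions = []
--     while segs:
--         best = 0
--         for i in range(1, len(segs)):
--             if segs[i][0] < segs[best][0]:
--                 best = i
--         start, end = segs.pop(best)
--         positions.extend(range(start, end + 1))
--     return positions[::-1] if strand == "-" else positions
-- ===== Notes on version B (the rewrite author's own statement) =====
-- stated objective: alternative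
-- what changed: Replaces sort-then-expand with a selection algorithm: no sorted() call at all; it repeatedly scans the remaining segments for the first one with minimal start, pops it, emits its ascending range, and finally reverses the whole position list for the '-' strand.
import Mathlib
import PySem

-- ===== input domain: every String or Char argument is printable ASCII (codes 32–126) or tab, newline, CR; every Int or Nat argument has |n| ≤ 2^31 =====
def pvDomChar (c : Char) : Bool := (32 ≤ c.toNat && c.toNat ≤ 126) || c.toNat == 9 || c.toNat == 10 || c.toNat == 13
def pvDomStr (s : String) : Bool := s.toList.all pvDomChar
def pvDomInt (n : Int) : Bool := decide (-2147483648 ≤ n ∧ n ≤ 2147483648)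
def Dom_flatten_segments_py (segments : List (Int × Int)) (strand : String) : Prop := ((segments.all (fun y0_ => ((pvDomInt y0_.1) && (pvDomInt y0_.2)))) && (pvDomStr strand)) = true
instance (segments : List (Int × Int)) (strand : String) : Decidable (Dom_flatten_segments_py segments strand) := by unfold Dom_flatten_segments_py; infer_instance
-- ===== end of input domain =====

-- B (alternative): selection algorithm — no sort call; repeatedly pop the first segment with
-- minimal start, emit its ascending range, and reverse the whole list for the '-' strand.


-- ===== PORT A =====
-- A: empty early-return; sort by start; two direction-specific nested loops appending positions.
def flatten_segments_py (segments : List (Int × Int)) (strand : String) : List Int :=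
  if segments = [] then []
  else
    let ordered := PySem.List.sorted segments (fun x => x.1) false
    if strand = "-" then
      (ordered.reverse).foldl
        (fun positions se => positions ++ PySem.List.pyRange se.2 (se.1 - 1) (-1)) []
    else
      ordered.foldl
        (fun positions se => positions ++ PySem.List.pyRange se.1 (se.2 + 1) 1) []

-- ===== PORT B =====
-- B helper: Source B's inner scan-for-the-first-minimal-start plus `pop(best)`, fused into one
-- structural recursion: selectFirst b l = (first segment of b::l with minimal start,
-- the remaining segments of b::l in their original order).
def selectFirst : (Int × Int) → List (Int × Int) → (Int × Int) × List (Int × Int)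
  | b, [] => (b, [])
  | b, x :: xs =>
    if (selectFirst x xs).1.1 < b.1 then
      ((selectFirst x xs).1, b :: (selectFirst x xs).2)
    else
      (b, x :: xs)

theorem selectFirst_length : ∀ (l : List (Int × Int)) (b : Int × Int),
    (selectFirst b l).2.length = l.length := by
  intro l
  induction l with
  | nil => intro b; simp [selectFirst]
  | cons x xs ih =>
    intro b
    by_cases h : (selectFirst x xs).1.1 < b.1 <;> simp [selectFirst, h, ih]

-- B's while loop: select the first minimal-start segment, emit its ascending range, recurse.
def expandSel (segs : List (Int × Int)) : List Int :=
  match segs with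
  | [] => []
  | b :: l =>
    PySem.List.pyRange (selectFirst b l).1.1 ((selectFirst b l).1.2 + 1) 1 ++
      expandSel (selectFirst b l).2
termination_by segs.length
decreasing_by simp [selectFirst_length]

def flatten_segments_py_alt (segments : List (Int × Int)) (strand : String) : List Int :=
  let positions := expandSel segments
  if strand = "-" then positions.reverse else positions

-- ===== PRECONDITION & SPEC =====
def Spec_flatten_segments_py (segments : List (Int × Int)) (strand : String) (out : List Int) : Prop := out = flatten_segments_py_alt segments strand
instance (segments : List (Int × Int)) (strand : String) (out : List Int) : Decidable (Spec_flatten_segments_py segments strand out) := by unfold Spec_flatten_segments_py; infer_instance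

-- ===== CLAIM (what is proved, stated in full; the proofs are below) =====
def Claim_equal_flatten_segments_py : Prop := ∀ (segments : List (Int × Int)) (strand : String), Dom_flatten_segments_py segments strand → Spec_flatten_segments_py segments strand (flatten_segments_py segments strand)

-- ===== LEMMAS AND PROOFS =====

theorem selectFirst_append (l : List (Int × Int)) : ∀ (b x : Int × Int),
    selectFirst b (l ++ [x]) =
      if x.1 < (selectFirst b l).1.1 then (x, b :: l)
      else ((selectFirst b l).1, (selectFirst b l).2 ++ [x]) := by
  induction l with
  | nil => intro b x; by_cases h : x.1 < b.1 <;> simp [selectFirst, h]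
  | cons y ys ih =>
    intro b x
    rw [List.cons_append, selectFirst, ih y x, selectFirst]
    by_cases h2 : x.1 < (selectFirst y ys).1.1
    · simp only [h2, if_pos]
      by_cases h : (selectFirst y ys).1.1 < b.1
      · have : x.1 < b.1 := lt_trans h2 h
        simp [h, h2, this]
      · by_cases hxb : x.1 < b.1 <;> simp [h, hxb]
    · simp only [h2, if_neg, not_false_iff]
      by_cases h : (selectFirst y ys).1.1 < b.1
      · simp [h, h2]
      · have hxb : ¬ x.1 < b.1 := fun hx =>
          h2 (lt_of_lt_of_le hx (not_lt.mp h))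
        simp [h, hxb]

theorem sorted_append_singleton (l : List (Int × Int)) (x : Int × Int) :
    PySem.List.sorted (l ++ [x]) (fun s => s.1) false =
      PySem.List.insertBy (fun a b => decide (a.1 < b.1)) x
        (PySem.List.sorted l (fun s => s.1) false) := by
  rw [PySem.List.sorted_eq_foldl_insertBy, PySem.List.sorted_eq_foldl_insertBy,
    List.foldl_append]
  rfl

theorem sorted_cons_selectFirst (l : List (Int × Int)) : ∀ (b : Int × Int),
    PySem.List.sorted (b :: l) (fun s => s.1) false =
      (selectFirst b l).1 :: PySem.List.sorted (selectFirst b l).2 (fun s => s.1) false := by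
  induction l using List.reverseRecOn with
  | nil => intro b; rfl
  | append_singleton l x ih =>
    intro b
    have hcons : b :: (l ++ [x]) = (b :: l) ++ [x] := by simp
    rw [hcons, sorted_append_singleton, ih b, selectFirst_append l b x]
    by_cases h : x.1 < (selectFirst b l).1.1
    · simp only [h, if_pos]
      rw [show (PySem.List.insertBy (fun a b => decide (a.1 < b.1)) x
          ((selectFirst b l).1 :: PySem.List.sorted (selectFirst b l).2 (fun s => s.1) false)) =
          x :: (selectFirst b l).1 ::
            PySem.List.sorted (selectFirst b l).2 (fun s => s.1) false from by
        simp [PySem.List.insertBy, h]]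
      rw [← ih b]
    · simp only [h, if_neg, not_false_iff]
      rw [show (PySem.List.insertBy (fun a b => decide (a.1 < b.1)) x
          ((selectFirst b l).1 :: PySem.List.sorted (selectFirst b l).2 (fun s => s.1) false)) =
          (selectFirst b l).1 :: PySem.List.insertBy (fun a b => decide (a.1 < b.1)) x
            (PySem.List.sorted (selectFirst b l).2 (fun s => s.1) false) from by
        simp [PySem.List.insertBy, h]]
      rw [sorted_append_singleton]

theorem expandSel_eq : ∀ (n : Nat) (l : List (Int × Int)), l.length ≤ n →
    expandSel l = (PySem.List.sorted l (fun s => s.1) false).flatMap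
      (fun se => PySem.List.pyRange se.1 (se.2 + 1) 1) := by
  intro n
  induction n with
  | zero =>
    intro l hl
    have : l = [] := List.length_eq_zero_iff.mp (Nat.le_zero.mp hl)
    subst this; simp [expandSel, PySem.List.sorted]
  | succ n ih =>
    intro l hl
    match l with
    | [] => simp [expandSel, PySem.List.sorted]
    | b :: t =>
      rw [expandSel, sorted_cons_selectFirst t b, List.flatMap_cons,
        ih (selectFirst b t).2 (by rw [selectFirst_length]; exact Nat.le_of_succ_le_succ hl)]

-- ===== VERDICT (by name: the statement is the Claim_ definition above) =====
theorem flatten_segments_py_spec : Claim_equal_flatten_segments_py := by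
  intro segments strand _
  unfold Spec_flatten_segments_py flatten_segments_py flatten_segments_py_alt
  have hB := expandSel_eq segments.length segments (le_refl _)
  by_cases hs : segments = []
  · subst hs; simp [expandSel]
  · simp only [hs, if_false]
    by_cases hstr : strand = "-"
    · simp only [hstr,
        PySem.List.foldl_append_eq_flatMap, List.nil_append, hB]
      rw [List.reverse_flatMap]
      refine List.flatMap_congr ?_ |>.symm
      intro se _
      rw [PySem.List.pyRange_neg_one_eq_reverse]
      norm_num
    · simp [hstr, List.flatMap_def, hB]
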